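-- pv_equiv track=rewrite | github.com/Svanfridurjulia/FORRITUN-SJS-HR | Verkefni - einstaklings/sequence_analysis.py | remove_str
-- ===== SOURCE A (Python) =====
-- def remove_str(opened_file):
--     """Function that removes words and letters from list and returns the new list"""
--     number_list = opened_file
--     count = len(number_list)
--     for number in range(count):
--         number += 1
--         for element in opened_file:
--             if element >= 'a':
--                 number_list.remove(element)
--     return number_list
-- ===== SOURCE B (Python) =====
-- def remove_str(opened_file):
--     """Function that removes words and letters from list and returns the new list"""
--     opened_file[:] = [x for x in opened_file if x < 'a']
--     return opened_file
-- ===== Notes on version B (the rewrite author's own statement) =====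
-- stated objective: faster
-- what changed: Replaced the quadratic repeated remove-while-iterating passes with a single linear filter pass assigned back in place via slice assignment.
import Mathlib
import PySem

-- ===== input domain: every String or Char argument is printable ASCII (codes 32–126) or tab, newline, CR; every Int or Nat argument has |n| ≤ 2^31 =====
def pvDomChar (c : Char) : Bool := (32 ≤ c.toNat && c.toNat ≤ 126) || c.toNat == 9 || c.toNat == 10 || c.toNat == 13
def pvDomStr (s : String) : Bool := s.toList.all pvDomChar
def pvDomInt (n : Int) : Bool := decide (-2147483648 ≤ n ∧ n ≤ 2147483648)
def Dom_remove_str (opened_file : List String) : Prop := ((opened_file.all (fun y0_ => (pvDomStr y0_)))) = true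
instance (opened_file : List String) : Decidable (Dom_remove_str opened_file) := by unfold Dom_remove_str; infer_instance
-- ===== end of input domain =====

-- B replaces A's quadratic remove-while-iterating passes by one linear filter pass (return value proved equal;
-- both Pythons mutate the argument list in place to the same final contents).

-- ===== PORT A =====
-- one inner 'for element in opened_file: if element >= 'a': number_list.remove(element)' pass, modelled as
-- Python's list iterator: index i advances by 1 each step over the mutating list, remove erases the first occurrence
def removePassA (lst : List String) (i : Nat) : List String :=
  if h : i < lst.length then
    if ¬ (lst[i] < "a") then removePassA (lst.erase lst[i]) (i + 1)
    else removePassA lst (i + 1)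
  else lst
termination_by lst.length - i
decreasing_by
· have hm : lst[i] ∈ lst := List.getElem_mem h
  have := List.length_erase_of_mem hm
  omega
· omega

def remove_str (opened_file : List String) : List String :=
  (PySem.List.pyRange 0 (opened_file.length) 1).foldl (fun acc _ => removePassA acc 0) opened_file

-- ===== PORT B =====
def remove_str_alt (opened_file : List String) : List String :=
  opened_file.filter (fun x => decide (x < "a"))

-- ===== PRECONDITION & SPEC =====
def Spec_remove_str (opened_file : List String) (out : List String) : Prop := out = remove_str_alt opened_file
instance (opened_file : List String) (out : List String) : Decidable (Spec_remove_str opened_file out) := by unfold Spec_remove_str; infer_instance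

-- ===== CLAIM (what is proved, stated in full; the proofs are below) =====
def Claim_equal_remove_str : Prop := ∀ (opened_file : List String), Dom_remove_str opened_file → Spec_remove_str opened_file (remove_str opened_file)



-- ===== LEMMAS AND PROOFS =====

-- erasing an element that the filter drops does not change the filter
theorem filter_erase_drop (e : String) (he : ¬ (e < "a")) :
    ∀ (l : List String), (l.erase e).filter (fun x => decide (x < "a")) = l.filter (fun x => decide (x < "a")) := by
  intro l
  induction l with
  | nil => simp
  | cons a t ih =>
    by_cases hae : a = e
    · subst hae
      rw [List.erase_cons_head, List.filter_cons]
      simp only [decide_eq_false he, Bool.false_eq_true, if_false]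
    · rw [List.erase_cons_tail (by simpa using hae)]
      simp only [List.filter_cons, ih]

-- one pass preserves the kept elements
theorem filter_removePassA : ∀ (l : List String) (i : Nat),
    (removePassA l i).filter (fun x => decide (x < "a")) = l.filter (fun x => decide (x < "a")) := by
  intro l i
  fun_induction removePassA l i with
  | case1 l i h he ih => rw [ih, filter_erase_drop _ he]
  | case2 l i h he ih => exact ih
  | case3 l i h => rfl

-- one pass never lengthens
theorem length_removePassA_le : ∀ (l : List String) (i : Nat),
    (removePassA l i).length ≤ l.length := by
  intro l i
  fun_induction removePassA l i with
  | case1 l i h he ih =>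
    have := List.length_erase_of_mem (List.getElem_mem h)
    omega
  | case2 l i h he ih => exact ih
  | case3 l i h => exact le_refl _

-- progress: if some yet-unvisited element is to be removed, the pass strictly shrinks
theorem length_removePassA_lt : ∀ (l : List String) (i : Nat),
    (∃ j, i ≤ j ∧ ∃ hj : j < l.length, ¬ (l[j] < "a")) →
    (removePassA l i).length < l.length := by
  intro l i
  fun_induction removePassA l i with
  | case1 l i h he ih =>
    intro _
    have h1 := List.length_erase_of_mem (List.getElem_mem h)
    have h2 := length_removePassA_le (l.erase l[i]) (i+1)
    omega
  | case2 l i h he ih =>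
    rintro ⟨j, hij, hj, hja⟩
    apply ih
    refine ⟨j, ?_, hj, hja⟩
    rcases Nat.eq_or_lt_of_le hij with rfl | hlt
    · exact (he hja).elim
    · omega
  | case3 l i h =>
    rintro ⟨j, hij, hj, _⟩
    omega

-- fixed point: nothing to remove
theorem removePassA_id : ∀ (l : List String) (i : Nat),
    (∀ x ∈ l, x < "a") → removePassA l i = l := by
  intro l i
  fun_induction removePassA l i with
  | case1 l i h he ih =>
    intro hall
    exact absurd (by exact hall l[i] (List.getElem_mem h)) (by simpa using he)
  | case2 l i h he ih => intro hall; exact ih hall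
  | case3 l i h => intro _; rfl

-- iterate the pass n times
def passIter : Nat → List String → List String
  | 0, l => l
  | n+1, l => passIter n (removePassA l 0)

theorem foldl_pass_eq_passIter : ∀ (r : List Int) (l : List String),
    r.foldl (fun acc _ => removePassA acc 0) l = passIter r.length l := by
  intro r
  induction r with
  | nil => intro l; rfl
  | cons a t ih => intro l; simp only [List.foldl, List.length_cons, passIter, ih]

theorem passIter_eq_filter : ∀ (n : Nat) (l : List String),
    l.length - (l.filter (fun x => decide (x < "a"))).length ≤ n →
    passIter n l = l.filter (fun x => decide (x < "a")) := by
  intro n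
  induction n with
  | zero =>
    intro l hc
    have hle := List.length_filter_le (fun x => decide (x < "a")) l
    have hlen : (l.filter (fun x => decide (x < "a"))).length = l.length := by omega
    have := (List.length_filter_eq_length_iff).mp hlen
    symm
    exact List.filter_eq_self.mpr this
  | succ n ih =>
    intro l hc
    by_cases hall : ∀ x ∈ l, x < "a"
    · have hid : removePassA l 0 = l := removePassA_id l 0 hall
      show passIter n (removePassA l 0) = _
      rw [hid]
      apply ih
      have hfs : l.filter (fun x => decide (x < "a")) = l := by
        apply List.filter_eq_self.mpr; simpa using hall
      rw [hfs]; omega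
    · rw [not_forall] at hall
      obtain ⟨x, hx2⟩ := hall
      rw [Classical.not_imp] at hx2
      obtain ⟨hx, hxa⟩ := hx2
      obtain ⟨j, hj, hje⟩ := List.mem_iff_getElem.mp hx
      have hlt : (removePassA l 0).length < l.length :=
        length_removePassA_lt l 0 ⟨j, Nat.zero_le _, hj, by rw [hje]; exact hxa⟩
      have hfil := filter_removePassA l 0
      show passIter n (removePassA l 0) = _
      rw [ih (removePassA l 0) (by rw [hfil]; omega), hfil]

-- ===== VERDICT (by name: the statement is the Claim_ definition above) =====
theorem remove_str_spec : Claim_equal_remove_str := by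
  intro l _
  show remove_str l = remove_str_alt l
  unfold remove_str remove_str_alt
  rw [foldl_pass_eq_passIter, PySem.List.length_pyRange_one]
  apply passIter_eq_filter
  have := List.length_filter_le (fun x => decide (x < "a")) l
  omega
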